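-- pv_equiv track=rewrite | github.com/Glennergy-Optimizer/glennergy | tools/doxygen_ai/update_docs.py | normalize_code_without_comments
-- ===== SOURCE A (Python) =====
-- def normalize_code_without_comments(text: str) -> str:
--     result: list[str] = []
--     i = 0
--     n = len(text)
--     in_line_comment = False
--     in_block_comment = False
--     in_string = False
--     in_char = False
--
--     while i < n:
--         ch = text[i]
--         nxt = text[i + 1] if i + 1 < n else ""
--
--         if in_line_comment:
--             if ch == "\n":
--                 in_line_comment = False
--                 result.append("\n")
--             i += 1
--             continue
--
--         if in_block_comment:
--             if ch == "*" and nxt == "/":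
--                 in_block_comment = False
--                 i += 2
--             else:
--                 if ch == "\n":
--                     result.append("\n")
--                 i += 1
--             continue
--
--         if in_string:
--             result.append(ch)
--             if ch == "\\" and i + 1 < n:
--                 result.append(text[i + 1])
--                 i += 2
--                 continue
--             if ch == '"':
--                 in_string = False
--             i += 1
--             continue
--
--         if in_char:
--             result.append(ch)
--             if ch == "\\" and i + 1 < n:
--                 result.append(text[i + 1])
--                 i += 2
--                 continue
--             if ch == "'":
--                 in_char = False
--             i += 1
--             continue
--
--         if ch == "/" and nxt == "/":
--             in_line_comment = True
--             i += 2
--             continue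
--
--         if ch == "/" and nxt == "*":
--             in_block_comment = True
--             i += 2
--             continue
--
--         if ch == '"':
--             in_string = True
--             result.append(ch)
--             i += 1
--             continue
--
--         if ch == "'":
--             in_char = True
--             result.append(ch)
--             i += 1
--             continue
--
--         result.append(ch)
--         i += 1
--
--     lines = [" ".join(line.split()) for line in "".join(result).splitlines()]
--     return "\n".join(line for line in lines if line)
-- ===== SOURCE B (Python) =====
-- def _scan_literal(text: str, i: int, quote: str) -> int:
--     # consume a string/char literal body starting just after the opening quote;
--     # backslash escapes eat two chars; an unterminated literal runs to EOF
--     n = len(text)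
--     while i < n:
--         c = text[i]
--         if c == "\\" and i + 1 < n:
--             i += 2
--         elif c == quote:
--             return i + 1
--         else:
--             i += 1
--     return n
--
--
-- def _skip_block(text: str, i: int):
--     # skip a /* ... */ body starting just after "/*"; keep its newlines
--     n = len(text)
--     nls = []
--     while i < n:
--         if text[i] == "*" and i + 1 < n and text[i + 1] == "/":
--             return "".join(nls), i + 2
--         if text[i] == "\n":
--             nls.append("\n")
--         i += 1
--     return "".join(nls), n
--
--
-- def normalize_code_without_comments(text: str) -> str:
--     out: list[str] = []
--     i = 0
--     n = len(text)
--     while i < n: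
--         c = text[i]
--         if c == "/" and text.startswith("//", i):
--             i += 2
--             while i < n and text[i] != "\n":
--                 i += 1  # the newline itself is code, handled next round
--         elif c == "/" and text.startswith("/*", i):
--             nls, i = _skip_block(text, i + 2)
--             out.append(nls)
--         elif c == '"' or c == "'":
--             j = _scan_literal(text, i + 1, c)
--             out.append(text[i:j])
--             i = j
--         else:
--             out.append(c)
--             i += 1
--     lines = [" ".join(line.split()) for line in "".join(out).splitlines()]
--     return "\n".join(line for line in lines if line)
-- ===== Notes on version B (the rewrite author's own statement) =====
-- stated objective: alternative
-- what changed: A's single character-at-a-time loop over four boolean mode flags is replaced by a recursive-descent dispatcher whose dedicated sub-scanners consume whole string/char literals, line comments and block comments in one step.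
import Mathlib
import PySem

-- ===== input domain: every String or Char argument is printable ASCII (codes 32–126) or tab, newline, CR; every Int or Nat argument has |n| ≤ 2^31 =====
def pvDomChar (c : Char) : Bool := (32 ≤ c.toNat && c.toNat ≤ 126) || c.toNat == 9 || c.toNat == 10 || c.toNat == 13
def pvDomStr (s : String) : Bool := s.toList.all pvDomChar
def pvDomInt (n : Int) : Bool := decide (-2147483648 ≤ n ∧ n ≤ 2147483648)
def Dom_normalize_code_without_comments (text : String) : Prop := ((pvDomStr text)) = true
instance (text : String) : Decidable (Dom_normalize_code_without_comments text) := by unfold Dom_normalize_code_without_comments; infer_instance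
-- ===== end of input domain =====

-- B replaces A's four-boolean one-char-at-a-time state machine by a recursive-descent
-- dispatcher whose sub-scanners consume whole literals / comments (objective: alternative).

-- ===== PORT A =====
-- A's while loop over the index with flags (in_line_comment, in_block_comment,
-- in_string, in_char), as structural recursion over the character list; the
-- `rest = []` branches mirror nxt = "" when i + 1 >= n.
def pvLoopA : List Char → Bool → Bool → Bool → Bool → List Char
  | [], _, _, _, _ => []
  | [ch], lc, bc, st, cm =>
    -- last character: nxt = "" in A, so no two-character guard can fire
    if lc then if ch = '\n' then ['\n'] else []
    else if bc then if ch = '\n' then ['\n'] else []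
    else if st then [ch]
    else if cm then [ch]
    else [ch]
  | ch :: nxt :: rest2, lc, bc, st, cm =>
    if lc then
      if ch = '\n' then '\n' :: pvLoopA (nxt :: rest2) false bc st cm
      else pvLoopA (nxt :: rest2) lc bc st cm
    else if bc then
      if ch = '*' ∧ nxt = '/' then pvLoopA rest2 lc false st cm
      else if ch = '\n' then '\n' :: pvLoopA (nxt :: rest2) lc bc st cm
      else pvLoopA (nxt :: rest2) lc bc st cm
    else if st then
      if ch = '\\' then ch :: nxt :: pvLoopA rest2 lc bc st cm
      else if ch = '"' then ch :: pvLoopA (nxt :: rest2) lc bc false cm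
      else ch :: pvLoopA (nxt :: rest2) lc bc st cm
    else if cm then
      if ch = '\\' then ch :: nxt :: pvLoopA rest2 lc bc st cm
      else if ch = '\'' then ch :: pvLoopA (nxt :: rest2) lc bc st false
      else ch :: pvLoopA (nxt :: rest2) lc bc st cm
    else
      if ch = '/' ∧ nxt = '/' then pvLoopA rest2 true bc st cm
      else if ch = '/' ∧ nxt = '*' then pvLoopA rest2 lc true st cm
      else if ch = '"' then ch :: pvLoopA (nxt :: rest2) lc bc true cm
      else if ch = '\'' then ch :: pvLoopA (nxt :: rest2) lc bc st true
      else ch :: pvLoopA (nxt :: rest2) lc bc st cm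

def normalize_code_without_comments (text : String) : String :=
  let result := pvLoopA text.toList false false false false
  let lines := (PySem.Chars.splitlines result).map
    (fun line => PySem.Chars.join [' '] (PySem.Chars.split₀ line))
  String.ofList (PySem.Chars.join ['\n'] (lines.filter (fun l => l ≠ [])))

-- ===== PORT B =====
-- B's _scan_literal: the literal body after the opening quote (escapes eat two
-- chars, unterminated runs to EOF); returns (consumed body, remainder).
def pvScanLit : List Char → Char → List Char × List Char
  | [], _ => ([], [])
  | '\\' :: x :: r, q =>
    let p := pvScanLit r q
    ('\\' :: x :: p.1, p.2)
  | c :: r, q =>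
    if c = q then ([c], r)
    else
      let p := pvScanLit r q
      (c :: p.1, p.2)

-- B's _skip_block: skip to past "*/" (or EOF), keeping the newlines.
def pvSkipBlock : List Char → List Char × List Char
  | '*' :: '/' :: r => ([], r)
  | c :: r =>
    let p := pvSkipBlock r
    (if c = '\n' then '\n' :: p.1 else p.1, p.2)
  | [] => ([], [])

theorem pvScanLit_snd_le (l : List Char) (q : Char) : (pvScanLit l q).2.length ≤ l.length := by
  induction l, q using pvScanLit.induct <;> simp_all [pvScanLit] <;> omega

theorem pvSkipBlock_snd_le (l : List Char) : (pvSkipBlock l).2.length ≤ l.length := by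
  induction l using pvSkipBlock.induct <;> simp_all [pvSkipBlock] <;> omega

-- B's main dispatcher: whole tokens at a time.
def pvLoopB : List Char → List Char
  | [] => []
  | '/' :: '/' :: r => pvLoopB (r.dropWhile (· ≠ '\n'))
  | '/' :: '*' :: r =>
    let p := pvSkipBlock r
    p.1 ++ pvLoopB p.2
  | c :: r =>
    if c = '"' ∨ c = '\'' then
      let p := pvScanLit r c
      c :: (p.1 ++ pvLoopB p.2)
    else c :: pvLoopB r
  termination_by l => l.length
  decreasing_by
  · have := List.length_dropWhile_le (fun c => decide ¬ c = '\n') r; simp at *; omega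
  · have := pvSkipBlock_snd_le r; simp at *; omega
  · have := pvScanLit_snd_le r c; simp at *; omega
  · simp

def normalize_code_without_comments_alt (text : String) : String :=
  let result := pvLoopB text.toList
  let lines := (PySem.Chars.splitlines result).map
    (fun line => PySem.Chars.join [' '] (PySem.Chars.split₀ line))
  String.ofList (PySem.Chars.join ['\n'] (lines.filter (fun l => l ≠ [])))

-- ===== PRECONDITION & SPEC =====
def Spec_normalize_code_without_comments (text : String) (out : String) : Prop := out = normalize_code_without_comments_alt text
instance (text : String) (out : String) : Decidable (Spec_normalize_code_without_comments text out) := by unfold Spec_normalize_code_without_comments; infer_instance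

-- ===== CLAIM (what is proved, stated in full; the proofs are below) =====
def Claim_equal_normalize_code_without_comments : Prop := ∀ (text : String), Dom_normalize_code_without_comments text → Spec_normalize_code_without_comments text (normalize_code_without_comments text)

-- ===== LEMMAS AND PROOFS =====

theorem pvLoopA_line (l : List Char) :
    pvLoopA l true false false false = pvLoopA (l.dropWhile (· ≠ '\n')) false false false false := by
  induction l with
  | nil => simp [pvLoopA, List.dropWhile]
  | cons ch rest ih =>
    cases rest with
    | nil => by_cases h : ch = '\n' <;> simp [pvLoopA, List.dropWhile, h]
    | cons nxt rest2 => by_cases h : ch = '\n' <;> simp_all [pvLoopA, List.dropWhile]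
theorem pvLoopA_block (l : List Char) :
    pvLoopA l false true false false =
      (pvSkipBlock l).1 ++ pvLoopA (pvSkipBlock l).2 false false false false := by
  induction l using pvSkipBlock.induct with
  | case1 r => simp [pvLoopA, pvSkipBlock]
  | case2 c r ih ih1 =>
    cases r with
    | nil => simp_all [pvLoopA, pvSkipBlock]
    | cons nxt rest2 =>
      have hne : ¬(c = '*' ∧ nxt = '/') := by rintro ⟨rfl, rfl⟩; exact ih _ rfl rfl
      have hs : pvSkipBlock (c :: nxt :: rest2) =
          ((if c = '\n' then '\n' :: (pvSkipBlock (nxt :: rest2)).1 else (pvSkipBlock (nxt :: rest2)).1),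
            (pvSkipBlock (nxt :: rest2)).2) := by
        rw [pvSkipBlock.eq_def]; split <;> simp_all
      rw [hs]
      by_cases h : c = '\n' <;> simp_all [pvLoopA]
  | case3 => simp [pvLoopA, pvSkipBlock]
theorem pvLoopA_lit (l : List Char) (q : Char) (st cm : Bool)
    (hq : (st, cm, q) = (true, false, '"') ∨ (st, cm, q) = (false, true, '\'')) :
    pvLoopA l false false st cm =
      (pvScanLit l q).1 ++ pvLoopA (pvScanLit l q).2 false false false false := by
  induction l, q using pvScanLit.induct with
  | case1 q => rcases hq with h | h <;> simp_all [pvLoopA, pvScanLit]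
  | case2 x r q ih =>
    rcases hq with h | h <;>
      (injection h with h1 h; injection h with h2 h3; subst h1; subst h2; subst h3;
       simp_all [pvLoopA, pvScanLit])
  | case3 r q hpat =>
    rcases hq with h | h <;>
      (injection h with h1 h; injection h with h2 h3; subst h1; subst h2; subst h3;
       cases r <;> simp_all [pvLoopA, pvScanLit])
  | case4 c r q hpat hc ih =>
    rcases hq with h | h <;>
      (injection h with h1 h; injection h with h2 h3; subst h1; subst h2; subst h3) <;>
      by_cases hb : c = '\\'
    · subst hb
      cases r with
      | nil => simp [pvLoopA, pvScanLit, hc]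
      | cons x r2 => exact (hpat x r2 rfl rfl).elim
    · cases r with
      | nil => simp [pvLoopA, pvScanLit, hc]
      | cons x r2 => simp_all [pvLoopA, pvScanLit]
    · subst hb
      cases r with
      | nil => simp [pvLoopA, pvScanLit, hc]
      | cons x r2 => exact (hpat x r2 rfl rfl).elim
    · cases r with
      | nil => simp [pvLoopA, pvScanLit, hc]
      | cons x r2 => simp_all [pvLoopA, pvScanLit]
theorem pvLoopB_line (r : List Char) :
    pvLoopB ('/' :: '/' :: r) = pvLoopB (r.dropWhile (· ≠ '\n')) := by
  rw [pvLoopB.eq_def]; rfl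

theorem pvLoopB_block (r : List Char) :
    pvLoopB ('/' :: '*' :: r) = (pvSkipBlock r).1 ++ pvLoopB (pvSkipBlock r).2 := by
  rw [pvLoopB.eq_def]; rfl

theorem pvLoopB_quote (c : Char) (r : List Char) (hq : c = '\"' ∨ c = '\'') :
    pvLoopB (c :: r) = c :: ((pvScanLit r c).1 ++ pvLoopB (pvScanLit r c).2) := by
  rcases hq with rfl | rfl <;> (rw [pvLoopB.eq_def]; simp)

theorem pvLoopB_other (c : Char) (r : List Char)
    (h1 : ∀ r', ¬(c :: r = '/' :: '/' :: r')) (h2 : ∀ r', ¬(c :: r = '/' :: '*' :: r'))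
    (hq : ¬(c = '\"' ∨ c = '\'')) :
    pvLoopB (c :: r) = c :: pvLoopB r := by
  rw [pvLoopB.eq_def]; split <;> simp_all

theorem pvLoopA_eq_pvLoopB (l : List Char) :
    pvLoopA l false false false false = pvLoopB l := by
  induction l using pvLoopB.induct with
  | case1 => simp [pvLoopA, pvLoopB]
  | case2 r ih =>
    rw [pvLoopB_line, ← ih]
    simp [pvLoopA, pvLoopA_line]
  | case3 r p ih =>
    rw [pvLoopB_block]
    rw [show pvLoopB p.2 = pvLoopA p.2 false false false false from ih.symm]
    simp [pvLoopA, pvLoopA_block]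
    rfl
  | case4 c r h1 h2 hq p ih =>
    rw [pvLoopB_quote c r hq]
    rw [show pvLoopB p.2 = pvLoopA p.2 false false false false from ih.symm]
    rcases hq with rfl | rfl
    · cases r with
      | nil => exact rfl
      | cons x r2 =>
        simp [pvLoopA, pvLoopA_lit (x :: r2) '\"' true false (Or.inl rfl)]
        rfl
    · cases r with
      | nil => exact rfl
      | cons x r2 =>
        simp [pvLoopA, pvLoopA_lit (x :: r2) '\'' false true (Or.inr rfl)]
        rfl
  | case5 c r h1 h2 hq ih =>
    have h1' : ∀ r', ¬(c :: r = '/' :: '/' :: r') := by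
      intro r' h; injection h with e1 e2; exact h1 r' e1 e2
    have h2' : ∀ r', ¬(c :: r = '/' :: '*' :: r') := by
      intro r' h; injection h with e1 e2; exact h2 r' e1 e2
    rw [pvLoopB_other c r h1' h2' hq, ← ih]
    rcases not_or.mp hq with ⟨hqa, hqb⟩
    cases r with
    | nil => simp [pvLoopA]
    | cons x r2 =>
      have hc1 : ¬(c = '/' ∧ x = '/') := by rintro ⟨rfl, rfl⟩; exact h1 r2 rfl rfl
      have hc2 : ¬(c = '/' ∧ x = '*') := by rintro ⟨rfl, rfl⟩; exact h2 r2 rfl rfl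
      simp [pvLoopA, hc1, hc2, hqa, hqb]

-- ===== VERDICT (by name: the statement is the Claim_ definition above) =====
theorem normalize_code_without_comments_spec : Claim_equal_normalize_code_without_comments := by
  intro text _
  unfold Spec_normalize_code_without_comments normalize_code_without_comments normalize_code_without_comments_alt
  rw [pvLoopA_eq_pvLoopB]
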